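-- pv_equiv track=rewrite | github.com/shawnhymers/challenges | bridge_hand_short_hand.py | bridge_hand_shorthand
-- ===== SOURCE A (Python) =====
-- def bridge_hand_shorthand(hand):
--     spades = []
--     hearts = []
--     diamonds = []
--     clubs = []
--     for i in range(0,len(hand)):
--         if hand[i][1] == 'spades':
--             spades.append(hand[i][0])
--         if hand[i][1] == 'hearts':
--             hearts.append(hand[i][0])
--         if hand[i][1] == 'diamonds':
--             diamonds.append(hand[i][0])
--         if hand[i][1] == 'clubs':
--             clubs.append(hand[i][0])
--     result = ''
--
--     # Spades
--     if len(spades)==0: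
--         result = result + '-'
--     else:
--         for i in range(0,len(spades)):
--             if spades[i] == 'ace':
--                 result = result +'A'
--         for i in range(0,len(spades)):
--             if spades[i] == 'king':
--                 result = result +'K'
--         for i in range(0,len(spades)):
--             if spades[i] == 'queen':
--                 result = result +'Q'
--         for i in range(0,len(spades)):
--             if spades[i] == 'jack':
--                 result = result +'J'
--         for i in range(0,len(spades)):
--             if (spades[i] != 'jack')&(spades[i] != 'queen')&(spades[i] != 'king')&(spades[i] != 'ace'):
--                 result = result +'x'
--     result = result +' '
--
--     # hearts
--     if len(hearts)==0:
--         result = result + '-'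
--     else:
--         for i in range(0,len(hearts)):
--             if hearts[i] == 'ace':
--                 result = result +'A'
--         for i in range(0,len(hearts)):
--             if hearts[i] == 'king':
--                 result = result +'K'
--         for i in range(0,len(hearts)):
--             if hearts[i] == 'queen':
--                 result = result +'Q'
--         for i in range(0,len(hearts)):
--             if hearts[i] == 'jack':
--                 result = result +'J'
--         for i in range(0,len(hearts)):
--             if (hearts[i] != 'jack')&(hearts[i] != 'queen')&(hearts[i] != 'king')&(hearts[i] != 'ace'):
--                 result = result +'x'
--     result = result +' '
--
--     # diamonds
--     if len(diamonds)==0: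
--         result = result + '-'
--     else:
--         for i in range(0,len(diamonds)):
--             if diamonds[i] == 'ace':
--                 result = result +'A'
--         for i in range(0,len(diamonds)):
--             if diamonds[i] == 'king':
--                 result = result +'K'
--         for i in range(0,len(diamonds)):
--             if diamonds[i] == 'queen':
--                 result = result +'Q'
--         for i in range(0,len(diamonds)):
--             if diamonds[i] == 'jack':
--                 result = result +'J'
--         for i in range(0,len(diamonds)):
--             if (diamonds[i] != 'jack')&(diamonds[i] != 'queen')&(diamonds[i] != 'king')&(diamonds[i] != 'ace'):
--                 result = result +'x'
--     result = result +' '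
--
--     # clubs
--     if len(clubs)==0:
--         result = result + '-'
--     else:
--         for i in range(0,len(clubs)):
--             if clubs[i] == 'ace':
--                 result = result +'A'
--         for i in range(0,len(clubs)):
--             if clubs[i] == 'king':
--                 result = result +'K'
--         for i in range(0,len(clubs)):
--             if clubs[i] == 'queen':
--                 result = result +'Q'
--         for i in range(0,len(clubs)):
--             if clubs[i] == 'jack':
--                 result = result +'J'
--         for i in range(0,len(clubs)):
--             if (clubs[i] != 'jack')&(clubs[i] != 'queen')&(clubs[i] != 'king')&(clubs[i] != 'ace'):
--                 result = result +'x'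
--     return(result)
-- ===== SOURCE B (Python) =====
-- def bridge_hand_shorthand(hand):
--     symbol = {'ace': 'A', 'king': 'K', 'queen': 'Q', 'jack': 'J'}
--     counts = {}
--     for rank, suit in hand:
--         key = (suit, symbol.get(rank, 'x'))
--         counts[key] = counts.get(key, 0) + 1
--     pieces = []
--     for suit in ('spades', 'hearts', 'diamonds', 'clubs'):
--         piece = ''.join(sym * counts.get((suit, sym), 0) for sym in 'AKQJx')
--         pieces.append(piece or '-')
--     return ' '.join(pieces)
-- ===== Notes on version B (the rewrite author's own statement) =====
-- stated objective: alternative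
-- what changed: Replaces A's four suit lists and twenty scan-and-append passes by a single pass that increments a counter dict keyed by (suit, symbol-class), after which each suit's piece is emitted directly from the five counts with string repetition; no per-suit rank lists exist at all.
import Mathlib
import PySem

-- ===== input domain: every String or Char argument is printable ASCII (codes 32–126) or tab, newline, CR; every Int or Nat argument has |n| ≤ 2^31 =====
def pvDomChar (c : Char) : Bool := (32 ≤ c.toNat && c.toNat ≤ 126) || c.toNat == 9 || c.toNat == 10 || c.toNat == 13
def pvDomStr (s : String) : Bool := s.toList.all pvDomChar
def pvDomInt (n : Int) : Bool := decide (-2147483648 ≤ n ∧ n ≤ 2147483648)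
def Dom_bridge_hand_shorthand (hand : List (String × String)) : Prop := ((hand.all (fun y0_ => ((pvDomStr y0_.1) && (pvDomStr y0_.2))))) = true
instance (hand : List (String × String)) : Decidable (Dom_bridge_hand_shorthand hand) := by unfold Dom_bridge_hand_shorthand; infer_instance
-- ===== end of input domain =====

set_option maxRecDepth 4096


-- B replaces A's four suit lists and twenty scan-and-append passes by a single counting pass
-- into a dict keyed by (suit, symbol-class), then emits each suit's piece from the five counts
-- (objective: alternative algorithm, same exact output).

-- ===== PORT A =====
def bridge_hand_shorthand (hand : List (String × String)) : String :=
  -- the indexed loop 'for i in range(0,len(hand))' walks hand in order: ported as a fold over hand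
  -- with the four suit lists as the accumulator (appends at the end, as Python's .append)
  let b := hand.foldl
    (fun (acc : List String × (List String × (List String × List String))) card =>
      (if card.2 == "spades" then acc.1 ++ [card.1] else acc.1,
       (if card.2 == "hearts" then acc.2.1 ++ [card.1] else acc.2.1,
        (if card.2 == "diamonds" then acc.2.2.1 ++ [card.1] else acc.2.2.1,
         if card.2 == "clubs" then acc.2.2.2 ++ [card.1] else acc.2.2.2))))
    ([], ([], ([], [])))
  let spades := b.1
  let hearts := b.2.1
  let diamonds := b.2.2.1
  let clubs := b.2.2.2
  let result := ""
  -- Spades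
  let result :=
    if spades.length == 0 then result ++ "-"
    else
      let result := spades.foldl (fun r x => if x == "ace" then r ++ "A" else r) result
      let result := spades.foldl (fun r x => if x == "king" then r ++ "K" else r) result
      let result := spades.foldl (fun r x => if x == "queen" then r ++ "Q" else r) result
      let result := spades.foldl (fun r x => if x == "jack" then r ++ "J" else r) result
      spades.foldl (fun r x => if (x != "jack") && (x != "queen") && (x != "king") && (x != "ace") then r ++ "x" else r) result
  let result := result ++ " "
  -- hearts
  let result :=
    if hearts.length == 0 then result ++ "-"
    else
      let result := hearts.foldl (fun r x => if x == "ace" then r ++ "A" else r) result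
      let result := hearts.foldl (fun r x => if x == "king" then r ++ "K" else r) result
      let result := hearts.foldl (fun r x => if x == "queen" then r ++ "Q" else r) result
      let result := hearts.foldl (fun r x => if x == "jack" then r ++ "J" else r) result
      hearts.foldl (fun r x => if (x != "jack") && (x != "queen") && (x != "king") && (x != "ace") then r ++ "x" else r) result
  let result := result ++ " "
  -- diamonds
  let result :=
    if diamonds.length == 0 then result ++ "-"
    else
      let result := diamonds.foldl (fun r x => if x == "ace" then r ++ "A" else r) result
      let result := diamonds.foldl (fun r x => if x == "king" then r ++ "K" else r) result
      let result := diamonds.foldl (fun r x => if x == "queen" then r ++ "Q" else r) result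
      let result := diamonds.foldl (fun r x => if x == "jack" then r ++ "J" else r) result
      diamonds.foldl (fun r x => if (x != "jack") && (x != "queen") && (x != "king") && (x != "ace") then r ++ "x" else r) result
  let result := result ++ " "
  -- clubs
  let result :=
    if clubs.length == 0 then result ++ "-"
    else
      let result := clubs.foldl (fun r x => if x == "ace" then r ++ "A" else r) result
      let result := clubs.foldl (fun r x => if x == "king" then r ++ "K" else r) result
      let result := clubs.foldl (fun r x => if x == "queen" then r ++ "Q" else r) result
      let result := clubs.foldl (fun r x => if x == "jack" then r ++ "J" else r) result
      clubs.foldl (fun r x => if (x != "jack") && (x != "queen") && (x != "king") && (x != "ace") then r ++ "x" else r) result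
  result

-- ===== PORT B =====
-- Python's "symbol.get(rank, 'x')" on the literal dict {'ace':'A','king':'K','queen':'Q','jack':'J'}
def clsOf (r : String) : String :=
  (PySem.Dict.ofList [("ace", "A"), ("king", "K"), ("queen", "Q"), ("jack", "J")]).getD r "x"

-- Python's 'sym * n' string repetition for an int count (exact: negative count gives "")
def strRep (c : String) : Nat → String
  | 0 => ""
  | n + 1 => c ++ strRep c n

def pyRep (c : String) (n : Int) : String := strRep c n.toNat

def bridge_hand_shorthand_alt (hand : List (String × String)) : String :=
  -- one counting pass: counts[(suit, symbol.get(rank,'x'))] += 1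
  let counts := hand.foldl
    (fun (d : PySem.Dict (String × String) Int) card =>
      let key := (card.2, clsOf card.1)
      d.insert key (d.getD key 0 + 1))
    PySem.Dict.empty
  PySem.Str.join " " (["spades", "hearts", "diamonds", "clubs"].map (fun suit =>
    let piece := PySem.Str.join "" (["A", "K", "Q", "J", "x"].map (fun sym =>
      pyRep sym (counts.getD (suit, sym) 0)))
    if piece = "" then "-" else piece))

-- ===== PRECONDITION & SPEC =====
def Spec_bridge_hand_shorthand (hand : List (String × String)) (out : String) : Prop := out = bridge_hand_shorthand_alt hand
instance (hand : List (String × String)) (out : String) : Decidable (Spec_bridge_hand_shorthand hand out) := by unfold Spec_bridge_hand_shorthand; infer_instance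

-- ===== CLAIM (what is proved, stated in full; the proofs are below) =====
def Claim_equal_bridge_hand_shorthand : Prop := ∀ (hand : List (String × String)), Dom_bridge_hand_shorthand hand → Spec_bridge_hand_shorthand hand (bridge_hand_shorthand hand)

-- ===== LEMMAS AND PROOFS =====

-- the low-card predicate (used to state counts on the A side)
def lowP (x : String) : Bool := !(["ace", "king", "queen", "jack"].contains x)

-- the canonical per-suit piece both sides are reduced to
def piece5 (ranks : List String) : String :=
  strRep "A" (ranks.count "ace") ++ strRep "K" (ranks.count "king") ++
  strRep "Q" (ranks.count "queen") ++ strRep "J" (ranks.count "jack") ++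
  strRep "x" (ranks.countP lowP)

theorem join4 (sep a b c d : String) :
    PySem.Str.join sep [a, b, c, d] = a ++ sep ++ b ++ sep ++ c ++ sep ++ d := by
  apply String.ext
  simp [PySem.Chars.join, List.intercalate, List.intersperse]

theorem join5 (a b c d e : String) :
    PySem.Str.join "" [a, b, c, d, e] = a ++ b ++ c ++ d ++ e := by
  apply String.ext
  simp [PySem.Chars.join, List.intercalate, List.intersperse]

theorem pass_countP (p : String → Bool) (c : String) (s : List String) (r : String) :
    s.foldl (fun r x => if p x then r ++ c else r) r = r ++ strRep c (s.countP p) := by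
  induction s generalizing r with
  | nil => simp [strRep]
  | cons h t ih =>
      by_cases hp : p h
      · simp [List.foldl_cons, hp, ih, strRep, String.append_assoc]
      · simp [List.foldl_cons, hp, ih]

theorem pass_count (v c : String) (s : List String) (r : String) :
    s.foldl (fun r x => if x == v then r ++ c else r) r = r ++ strRep c (s.count v) := by
  rw [List.count_eq_countP]
  exact pass_countP (fun x => x == v) c s r

theorem lowPred_eq (x : String) :
    ((x != "jack") && (x != "queen") && (x != "king") && (x != "ace")) = lowP x := by
  by_cases h1 : x = "jack" <;> by_cases h2 : x = "queen" <;> by_cases h3 : x = "king"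
    <;> by_cases h4 : x = "ace" <;> simp_all [lowP]

-- A's five passes over one suit append exactly piece5 (or '-' on the empty suit)
theorem suit_block (s : List String) (r : String) :
    (if s.length == 0 then r ++ "-"
     else
       let r1 := s.foldl (fun r x => if x == "ace" then r ++ "A" else r) r
       let r2 := s.foldl (fun r x => if x == "king" then r ++ "K" else r) r1
       let r3 := s.foldl (fun r x => if x == "queen" then r ++ "Q" else r) r2
       let r4 := s.foldl (fun r x => if x == "jack" then r ++ "J" else r) r3
       s.foldl (fun r x => if (x != "jack") && (x != "queen") && (x != "king") && (x != "ace") then r ++ "x" else r) r4)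
      = r ++ (if s = [] then "-" else piece5 s) := by
  by_cases hs : s = []
  · subst hs; rfl
  · have hlen : (s.length == 0) = false := by simp [List.length_eq_zero_iff, hs]
    simp only [hlen, if_neg hs, Bool.false_eq_true, if_false]
    rw [pass_count "ace" "A", pass_count "king" "K", pass_count "queen" "Q", pass_count "jack" "J"]
    have : (fun (r : String) (x : String) =>
        if (x != "jack") && (x != "queen") && (x != "king") && (x != "ace") then r ++ "x" else r)
        = fun r x => if lowP x then r ++ "x" else r := by
      funext r x; rw [lowPred_eq]
    rw [this, pass_countP]
    simp [piece5, String.append_assoc]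

theorem bucket_eq (hand : List (String × String)) (a b c d : List String) :
    hand.foldl (fun (acc : List String × (List String × (List String × List String))) card =>
      (if card.2 == "spades" then acc.1 ++ [card.1] else acc.1,
       (if card.2 == "hearts" then acc.2.1 ++ [card.1] else acc.2.1,
        (if card.2 == "diamonds" then acc.2.2.1 ++ [card.1] else acc.2.2.1,
         if card.2 == "clubs" then acc.2.2.2 ++ [card.1] else acc.2.2.2)))) (a, (b, (c, d)))
    = (a ++ (hand.filter (fun c => c.2 == "spades")).map Prod.fst,
       (b ++ (hand.filter (fun c => c.2 == "hearts")).map Prod.fst,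
        (c ++ (hand.filter (fun c => c.2 == "diamonds")).map Prod.fst,
         d ++ (hand.filter (fun c => c.2 == "clubs")).map Prod.fst))) := by
  induction hand generalizing a b c d with
  | nil => simp
  | cons h t ih =>
      simp only [List.foldl_cons, List.filter_cons, ih]
      split_ifs <;> simp_all

-- clsOf classifies: it hits each honor symbol exactly on its rank name, 'x' otherwise
theorem clsOf_eq (r : String) :
    clsOf r = if r = "ace" then "A" else if r = "king" then "K" else
              if r = "queen" then "Q" else if r = "jack" then "J" else "x" := by
  have hd : (PySem.Dict.ofList [("ace", "A"), ("king", "K"), ("queen", "Q"), ("jack", "J")])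
      = PySem.Dict.mk [("ace", "A"), ("king", "K"), ("queen", "Q"), ("jack", "J")] := by decide
  by_cases h1 : r = "ace"
  · subst h1; decide
  by_cases h2 : r = "king"
  · subst h2; decide
  by_cases h3 : r = "queen"
  · subst h3; decide
  by_cases h4 : r = "jack"
  · subst h4; decide
  rw [if_neg h1, if_neg h2, if_neg h3, if_neg h4]
  have e1 : ("ace" == r) = false := beq_eq_false_iff_ne.mpr (Ne.symm h1)
  have e2 : ("king" == r) = false := beq_eq_false_iff_ne.mpr (Ne.symm h2)
  have e3 : ("queen" == r) = false := beq_eq_false_iff_ne.mpr (Ne.symm h3)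
  have e4 : ("jack" == r) = false := beq_eq_false_iff_ne.mpr (Ne.symm h4)
  simp [clsOf, hd, PySem.Dict.getD_eq_get?_getD, e1, e2, e3, e4,
    PySem.Dict.get?]

-- the counter's value at (suit, sym) counts the suit's ranks in class sym
theorem counts_getD (hand : List (String × String)) (suit sym : String) :
    (hand.foldl
      (fun (d : PySem.Dict (String × String) Int) card =>
        d.insert (card.2, clsOf card.1) (d.getD (card.2, clsOf card.1) 0 + 1))
      PySem.Dict.empty).getD (suit, sym) 0
    = (((hand.filter (fun c => c.2 == suit)).map Prod.fst).countP (fun r => clsOf r == sym) : Int) := by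
  have h1 : hand.foldl
      (fun (d : PySem.Dict (String × String) Int) card =>
        d.insert (card.2, clsOf card.1) (d.getD (card.2, clsOf card.1) 0 + 1))
      PySem.Dict.empty
      = (hand.map (fun card => (card.2, clsOf card.1))).foldl
          (fun (d : PySem.Dict (String × String) Int) k => d.insert k (d.getD k 0 + 1))
          PySem.Dict.empty := by
    rw [List.foldl_map]
  rw [h1, PySem.Dict.getD_foldl_insert_add_one, PySem.Dict.getD_empty]
  rw [List.count_eq_countP, List.countP_map, List.countP_map, List.countP_filter]
  simp only [Int.zero_add, Nat.cast_inj]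
  apply List.countP_congr
  intro c _
  by_cases hs : c.2 = suit <;> by_cases hc : clsOf c.1 = sym <;>
    simp [hs, hc, Prod.ext_iff, beq_iff_eq]

-- the five class predicates versus the rank names
theorem countP_cls_A (l : List String) :
    l.countP (fun r => clsOf r == "A") = l.count "ace" := by
  rw [List.count_eq_countP]; apply List.countP_congr; intro r _
  rw [clsOf_eq]; by_cases h1 : r = "ace" <;> by_cases h2 : r = "king" <;>
    by_cases h3 : r = "queen" <;> by_cases h4 : r = "jack" <;> simp_all
theorem countP_cls_K (l : List String) :
    l.countP (fun r => clsOf r == "K") = l.count "king" := by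
  rw [List.count_eq_countP]; apply List.countP_congr; intro r _
  rw [clsOf_eq]; by_cases h1 : r = "ace" <;> by_cases h2 : r = "king" <;>
    by_cases h3 : r = "queen" <;> by_cases h4 : r = "jack" <;> simp_all
theorem countP_cls_Q (l : List String) :
    l.countP (fun r => clsOf r == "Q") = l.count "queen" := by
  rw [List.count_eq_countP]; apply List.countP_congr; intro r _
  rw [clsOf_eq]; by_cases h1 : r = "ace" <;> by_cases h2 : r = "king" <;>
    by_cases h3 : r = "queen" <;> by_cases h4 : r = "jack" <;> simp_all
theorem countP_cls_J (l : List String) :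
    l.countP (fun r => clsOf r == "J") = l.count "jack" := by
  rw [List.count_eq_countP]; apply List.countP_congr; intro r _
  rw [clsOf_eq]; by_cases h1 : r = "ace" <;> by_cases h2 : r = "king" <;>
    by_cases h3 : r = "queen" <;> by_cases h4 : r = "jack" <;> simp_all
theorem countP_cls_x (l : List String) :
    l.countP (fun r => clsOf r == "x") = l.countP lowP := by
  apply List.countP_congr; intro r _
  rw [clsOf_eq]; by_cases h1 : r = "ace" <;> by_cases h2 : r = "king" <;>
    by_cases h3 : r = "queen" <;> by_cases h4 : r = "jack" <;> simp_all [lowP]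

theorem pyRep_natCast (c : String) (n : Nat) : pyRep c (n : Int) = strRep c n := by
  simp [pyRep]

-- the five class counts add up to the length (each rank is in exactly one class)
theorem sum_counts (s : List String) :
    s.count "ace" + s.count "king" + s.count "queen" + s.count "jack" + s.countP lowP
      = s.length := by
  induction s with
  | nil => simp
  | cons h t ih =>
      by_cases h1 : h = "ace" <;> by_cases h2 : h = "king" <;> by_cases h3 : h = "queen" <;>
        by_cases h4 : h = "jack" <;>
        simp_all [lowP] <;> omega

theorem strRep_length (c : String) (n : Nat) : (strRep c n).length = n * c.length := by
  induction n with
  | zero => simp [strRep]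
  | succ m ih => simp [strRep, String.length_append, ih]; ring

theorem piece5_eq_empty_iff (s : List String) : piece5 s = "" ↔ s = [] := by
  constructor
  · intro h
    have hl : (piece5 s).length = 0 := by rw [h]; rfl
    have l1 : ("A" : String).length = 1 := rfl
    have l2 : ("K" : String).length = 1 := rfl
    have l3 : ("Q" : String).length = 1 := rfl
    have l4 : ("J" : String).length = 1 := rfl
    have l5 : ("x" : String).length = 1 := rfl
    simp only [piece5, String.length_append, strRep_length, l1, l2, l3, l4, l5,
      Nat.mul_one] at hl
    have hsum := sum_counts s
    exact List.length_eq_zero_iff.mp (by omega)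
  · intro h; subst h; rfl

-- the '-'-for-empty test in terms of the rank list
theorem dash_eq (l : List String) :
    (if piece5 l = "" then "-" else piece5 l) = if l = [] then "-" else piece5 l := by
  by_cases h : l = []
  · rw [if_pos ((piece5_eq_empty_iff l).mpr h), if_pos h]
  · rw [if_neg (fun he => h ((piece5_eq_empty_iff l).mp he)), if_neg h]

-- B unfolds to the canonical four-piece form
theorem alt_eq (hand : List (String × String)) :
    bridge_hand_shorthand_alt hand =
      (if ((hand.filter (fun c => c.2 == "spades")).map Prod.fst) = [] then "-"
       else piece5 ((hand.filter (fun c => c.2 == "spades")).map Prod.fst)) ++ " " ++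
      (if ((hand.filter (fun c => c.2 == "hearts")).map Prod.fst) = [] then "-"
       else piece5 ((hand.filter (fun c => c.2 == "hearts")).map Prod.fst)) ++ " " ++
      (if ((hand.filter (fun c => c.2 == "diamonds")).map Prod.fst) = [] then "-"
       else piece5 ((hand.filter (fun c => c.2 == "diamonds")).map Prod.fst)) ++ " " ++
      (if ((hand.filter (fun c => c.2 == "clubs")).map Prod.fst) = [] then "-"
       else piece5 ((hand.filter (fun c => c.2 == "clubs")).map Prod.fst)) := by
  unfold bridge_hand_shorthand_alt
  simp only [List.map_cons, List.map_nil, counts_getD, pyRep_natCast, join5,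
    countP_cls_A, countP_cls_K, countP_cls_Q, countP_cls_J, countP_cls_x]
  have hp : ∀ l : List String,
      strRep "A" (l.count "ace") ++ strRep "K" (l.count "king") ++
        strRep "Q" (l.count "queen") ++ strRep "J" (l.count "jack") ++
        strRep "x" (l.countP lowP) = piece5 l := fun _ => rfl
  simp only [hp, dash_eq, join4]

-- ===== VERDICT (by name: the statement is the Claim_ definition above) =====
theorem bridge_hand_shorthand_spec : Claim_equal_bridge_hand_shorthand := by
  intro hand _
  unfold Spec_bridge_hand_shorthand bridge_hand_shorthand
  rw [alt_eq]
  simp only [bucket_eq, List.nil_append]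
  rw [suit_block, suit_block, suit_block, suit_block]
  simp [String.append_assoc]
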